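-- pv_equiv track=rewrite | github.com/USYD2020/A2 | CUAD_data_spark_processing.py | extract_samples
-- ===== SOURCE A (Python) =====
-- def seq_contain_answer(seq_start_index, seq_end_index, answer_start, answer_end):
--     if answer_end < seq_start_index or answer_start > seq_end_index:
--         return False
--     else:
--         return True
--
-- def extract_samples(contract):
--     title = contract[0]
--     context = contract[1][0]
--     qas = contract[1][1]
--
--     ps_num = 0
--     pns_num = 0
--     samples = []
--     seq_num = int(len(context) / 2048) + 1
--
--     for num in range(seq_num):
--         seq_start_index = num * 2048
--         seq_end_index = min(seq_start_index + 4096, len(context) - 1)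
--         sequence = context[seq_start_index: seq_end_index]
--
--         for qa_pair in qas:
--             answers = qa_pair[0]
--             is_impossible = qa_pair[2]
--             question = qa_pair[3]
--             temp_ps = {}
--             temp_ns = {}
--
--             if is_impossible:
--                 sample = (title, sequence, question, 0, 0, "INS")
--                 # ignore overlap negative sample or sequence already mark as positive
--                 if temp_ps.get(sequence) is None and temp_ns.get(sequence) is None:
--                     temp_ns[sequence] = sample
--
--             else:
--                 for answer in answers:
--                     answer_start = answer[0]
--                     answer_text = answer[1]
--                     answer_end = answer_start + len(answer_text)
--                     if seq_contain_answer(seq_start_index, seq_end_index, answer_start, answer_end):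
--                         sample = (title, sequence, question, answer_start, answer_end, "PS")
--                         samples.append(sample)
--                         ps_num += 1
--                         temp_ps[sequence] = sample
--                         # remove negative sample after sequence marks as positive
--                         if temp_ns.get(sequence) is not None:
--                             if temp_ns.get(sequence)[5] == "PNS":
--                                 pns_num -= 1
--                             temp_ns.pop(sequence)
--                     else:
--                         # balance pns and ps
--                         if pns_num > ps_num:
--                             continue
--                         else:
--                             sample = (title, sequence, question, 0, 0, "PNS")
--                             # ignore overlap negative sample or sequence already mark as positive
--                             if temp_ps.get(sequence) is None and temp_ns.get(sequence) is None:
--                                 temp_ns[sequence] = sample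
--                                 pns_num += 1
--
--             # append unique negative samples
--             for value in temp_ns.values():
--                 samples.append(value)
--
--     return samples
-- ===== SOURCE B (Python) =====
-- def seq_contain_answer(seq_start_index, seq_end_index, answer_start, answer_end):
--     if answer_end < seq_start_index or answer_start > seq_end_index:
--         return False
--     else:
--         return True
--
-- def extract_samples(contract):
--     title = contract[0]
--     context = contract[1][0]
--     qas = contract[1][1]
--
--     ps_num = 0
--     pns_num = 0
--     samples = []
--     seq_num = int(len(context) / 2048) + 1
--
--     for num in range(seq_num):
--         seq_start_index = num * 2048
--         seq_end_index = min(seq_start_index + 4096, len(context) - 1)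
--         sequence = context[seq_start_index: seq_end_index]
--
--         for qa_pair in qas:
--             answers = qa_pair[0]
--             is_impossible = qa_pair[2]
--             question = qa_pair[3]
--
--             if is_impossible:
--                 samples.append((title, sequence, question, 0, 0, "INS"))
--             else:
--                 contained = [a for a in answers
--                              if seq_contain_answer(seq_start_index, seq_end_index, a[0], a[0] + len(a[1]))]
--                 if contained:
--                     for a in contained:
--                         samples.append((title, sequence, question, a[0], a[0] + len(a[1]), "PS"))
--                     ps_num += len(contained)
--                 elif answers and pns_num <= ps_num:
--                     samples.append((title, sequence, question, 0, 0, "PNS"))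
--                     pns_num += 1
--
--     return samples
-- ===== Notes on version B (the rewrite author's own statement) =====
-- stated objective: simpler
-- what changed: B drops A's per-question temp_ps/temp_ns dicts and the PNS add-then-remove bookkeeping: per question it emits one INS if impossible, else PS samples for the answers contained in the window, else a single PNS when answers exist and pns_num <= ps_num (A's cancellation provably nets to exactly this).
import Mathlib
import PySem

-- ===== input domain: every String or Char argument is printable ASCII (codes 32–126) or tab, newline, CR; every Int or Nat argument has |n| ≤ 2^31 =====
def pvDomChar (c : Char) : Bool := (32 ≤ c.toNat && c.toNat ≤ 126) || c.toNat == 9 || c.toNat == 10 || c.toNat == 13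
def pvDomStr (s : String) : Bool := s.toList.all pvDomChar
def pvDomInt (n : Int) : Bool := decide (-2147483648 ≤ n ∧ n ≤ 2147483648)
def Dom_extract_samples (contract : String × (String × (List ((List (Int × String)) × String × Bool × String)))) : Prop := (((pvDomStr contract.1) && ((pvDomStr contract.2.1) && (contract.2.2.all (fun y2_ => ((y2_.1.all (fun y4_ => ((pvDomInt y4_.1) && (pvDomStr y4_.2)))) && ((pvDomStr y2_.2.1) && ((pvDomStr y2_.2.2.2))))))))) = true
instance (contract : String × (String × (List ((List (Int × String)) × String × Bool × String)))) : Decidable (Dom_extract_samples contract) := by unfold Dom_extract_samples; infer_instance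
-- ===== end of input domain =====

-- B replaces A's per-question temp_ps/temp_ns dicts and the PNS add-then-remove bookkeeping by a direct
-- decision per question (objective: simpler); return values are proved identical.

-- ===== PORT A =====
def seq_contain_answer (seq_start_index seq_end_index answer_start answer_end : Int) : Bool :=
  if answer_end < seq_start_index || answer_start > seq_end_index then false else true

-- the body of A's `for answer in answers` loop; state = (ps_num, pns_num, samples, temp_ps, temp_ns)
def pvA_answer_step (title sequence question : String) (seq_start_index seq_end_index : Int)
    (st : Int × Int × List (String × String × String × Int × Int × String)
            × PySem.Dict String (String × String × String × Int × Int × String)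
            × PySem.Dict String (String × String × String × Int × Int × String))
    (answer : Int × String) :
    Int × Int × List (String × String × String × Int × Int × String)
      × PySem.Dict String (String × String × String × Int × Int × String)
      × PySem.Dict String (String × String × String × Int × Int × String) :=
  match st with
  | (ps_num, pns_num, samples, temp_ps, temp_ns) =>
    let answer_start := answer.1
    let answer_text := answer.2
    let answer_end := answer_start + PySem.Str.len answer_text
    if seq_contain_answer seq_start_index seq_end_index answer_start answer_end then
      let sample := (title, sequence, question, answer_start, answer_end, "PS")
      let samples := samples ++ [sample]
      let ps_num := ps_num + 1
      let temp_ps := temp_ps.insert sequence sample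
      match temp_ns.get? sequence with
      | some v =>
          let pns_num := if v.2.2.2.2.2 == "PNS" then pns_num - 1 else pns_num
          (ps_num, pns_num, samples, temp_ps, temp_ns.erase sequence)
      | none => (ps_num, pns_num, samples, temp_ps, temp_ns)
    else
      if pns_num > ps_num then (ps_num, pns_num, samples, temp_ps, temp_ns)
      else
        let sample := (title, sequence, question, 0, 0, "PNS")
        if (temp_ps.get? sequence).isNone && (temp_ns.get? sequence).isNone then
          (ps_num, pns_num + 1, samples, temp_ps, temp_ns.insert sequence sample)
        else (ps_num, pns_num, samples, temp_ps, temp_ns)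

-- the body of A's `for qa_pair in qas` loop (ends with appending temp_ns.values())
def pvA_qa_step (title sequence : String) (seq_start_index seq_end_index : Int)
    (st : Int × Int × List (String × String × String × Int × Int × String))
    (qa_pair : (List (Int × String)) × String × Bool × String) :
    Int × Int × List (String × String × String × Int × Int × String) :=
  match st with
  | (ps_num, pns_num, samples) =>
    let answers := qa_pair.1
    let is_impossible := qa_pair.2.2.1
    let question := qa_pair.2.2.2
    if is_impossible then
      let sample := (title, sequence, question, 0, 0, "INS")
      let temp_ns :=
        if ((PySem.Dict.empty : PySem.Dict String (String × String × String × Int × Int × String)).get? sequence).isNone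
            && ((PySem.Dict.empty : PySem.Dict String (String × String × String × Int × Int × String)).get? sequence).isNone then
          (PySem.Dict.empty : PySem.Dict String (String × String × String × Int × Int × String)).insert sequence sample
        else PySem.Dict.empty
      (ps_num, pns_num, samples ++ temp_ns.values)
    else
      let r := answers.foldl (pvA_answer_step title sequence question seq_start_index seq_end_index)
        (ps_num, pns_num, samples, PySem.Dict.empty, PySem.Dict.empty)
      (r.1, r.2.1, r.2.2.1 ++ r.2.2.2.2.values)

def extract_samples (contract : String × (String × (List ((List (Int × String)) × String × Bool × String)))) : List (String × String × String × Int × Int × String) :=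
  let title := contract.1
  let context := contract.2.1
  let qas := contract.2.2
  -- int(len(context) / 2048) + 1: len ≥ 0, so truncating the true quotient is floor division (exact on this domain)
  let seq_num := PySem.Int.floordiv (PySem.Str.len context) 2048 + 1
  let r := (PySem.List.pyRange 0 seq_num 1).foldl
    (fun st num =>
      let seq_start_index := num * 2048
      let seq_end_index := min (seq_start_index + 4096) (PySem.Str.len context - 1)
      let sequence := PySem.Str.slice context (some seq_start_index) (some seq_end_index)
      qas.foldl (pvA_qa_step title sequence seq_start_index seq_end_index) st)
    ((0 : Int), (0 : Int), ([] : List (String × String × String × Int × Int × String)))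
  r.2.2

-- ===== PORT B =====
-- B's per-question body: one decision, no temp dicts
def pvB_qa_step (title sequence : String) (seq_start_index seq_end_index : Int)
    (st : Int × Int × List (String × String × String × Int × Int × String))
    (qa_pair : (List (Int × String)) × String × Bool × String) :
    Int × Int × List (String × String × String × Int × Int × String) :=
  match st with
  | (ps_num, pns_num, samples) =>
    if qa_pair.2.2.1 then
      (ps_num, pns_num, samples ++ [(title, sequence, qa_pair.2.2.2, 0, 0, "INS")])
    else
      let contained := qa_pair.1.filter
        (fun a => seq_contain_answer seq_start_index seq_end_index a.1 (a.1 + PySem.Str.len a.2))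
      if contained ≠ [] then
        (ps_num + contained.length, pns_num,
          samples ++ contained.map (fun a => (title, sequence, qa_pair.2.2.2, a.1, a.1 + PySem.Str.len a.2, "PS")))
      else if qa_pair.1 ≠ [] ∧ pns_num ≤ ps_num then
        (ps_num, pns_num + 1, samples ++ [(title, sequence, qa_pair.2.2.2, 0, 0, "PNS")])
      else
        (ps_num, pns_num, samples)

def extract_samples_alt (contract : String × (String × (List ((List (Int × String)) × String × Bool × String)))) : List (String × String × String × Int × Int × String) :=
  let title := contract.1
  let context := contract.2.1
  let qas := contract.2.2
  let seq_num := PySem.Int.floordiv (PySem.Str.len context) 2048 + 1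
  let r := (PySem.List.pyRange 0 seq_num 1).foldl
    (fun st num =>
      let seq_start_index := num * 2048
      let seq_end_index := min (seq_start_index + 4096) (PySem.Str.len context - 1)
      let sequence := PySem.Str.slice context (some seq_start_index) (some seq_end_index)
      qas.foldl (pvB_qa_step title sequence seq_start_index seq_end_index) st)
    ((0 : Int), (0 : Int), ([] : List (String × String × String × Int × Int × String)))
  r.2.2

-- ===== PRECONDITION & SPEC =====
def Spec_extract_samples (contract : String × (String × (List ((List (Int × String)) × String × Bool × String)))) (out : List (String × String × String × Int × Int × String)) : Prop := out = extract_samples_alt contract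
instance (contract : String × (String × (List ((List (Int × String)) × String × Bool × String)))) (out : List (String × String × String × Int × Int × String)) : Decidable (Spec_extract_samples contract out) := by unfold Spec_extract_samples; infer_instance

-- ===== CLAIM (what is proved, stated in full; the proofs are below) =====
def Claim_equal_extract_samples : Prop := ∀ (contract : String × (String × (List ((List (Int × String)) × String × Bool × String)))), Dom_extract_samples contract → Spec_extract_samples contract (extract_samples contract)

-- ===== LEMMAS AND PROOFS =====

-- abbreviations used only by the proofs
abbrev pvS : Type := String × String × String × Int × Int × String

def pvC (a b : Int) (x : Int × String) : Bool :=
  seq_contain_answer a b x.1 (x.1 + PySem.Str.len x.2)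

def pvPS (t s q : String) (x : Int × String) : pvS :=
  (t, s, q, x.1, x.1 + PySem.Str.len x.2, "PS")

theorem pv_erase_insert (k : String) (v : pvS) :
    ((PySem.Dict.empty.insert k v).erase k) = (PySem.Dict.empty : PySem.Dict String pvS) := by
  simp [PySem.Dict.insert, PySem.Dict.erase, PySem.Dict.empty, PySem.Dict.contains]

theorem pv_values_insert (k : String) (v : pvS) :
    ((PySem.Dict.empty : PySem.Dict String pvS).insert k v).values = [v] := by
  simp [PySem.Dict.values, PySem.Dict.items_insert_of_not_contains, PySem.Dict.empty]

-- A's answer loop, started after a PS has been recorded (temp_ps nonempty at key `sequence`,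
-- temp_ns empty): every later answer only appends PS samples; pns_num never moves again.
theorem pvL2_step (t s q : String) (a b : Int) (x : Int × String)
    (ps pns : Int) (samples : List pvS) (tps : PySem.Dict String pvS)
    (hc : pvC a b x = true) :
    pvA_answer_step t s q a b (ps, pns, samples, tps, PySem.Dict.empty) x
      = (ps + 1, pns, samples ++ [pvPS t s q x], tps.insert s (pvPS t s q x), PySem.Dict.empty) := by
  simp only [pvC] at hc
  simp only [pvA_answer_step, hc, if_true, PySem.Dict.get?_empty, pvPS]

theorem pvL2_step_neg (t s q : String) (a b : Int) (x : Int × String)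
    (ps pns : Int) (samples : List pvS) (tps : PySem.Dict String pvS)
    (hs : (tps.get? s).isNone = false)
    (hc : pvC a b x = false) :
    pvA_answer_step t s q a b (ps, pns, samples, tps, PySem.Dict.empty) x
      = (ps, pns, samples, tps, PySem.Dict.empty) := by
  simp only [pvC] at hc
  simp only [pvA_answer_step, hc, Bool.false_eq_true, if_false]
  split_ifs with h1 h2
  · rfl
  · exfalso; rw [hs] at h2; simp at h2
  · rfl

theorem pvL2 (t s q : String) (a b : Int) (ans : List (Int × String)) :
    ∀ (ps pns : Int) (samples : List pvS) (tps : PySem.Dict String pvS),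
      (tps.get? s).isSome = true →
      ((ans.foldl (pvA_answer_step t s q a b) (ps, pns, samples, tps, PySem.Dict.empty)).1
          = ps + ((ans.filter (pvC a b)).length : Int)
        ∧ (ans.foldl (pvA_answer_step t s q a b) (ps, pns, samples, tps, PySem.Dict.empty)).2.1 = pns
        ∧ (ans.foldl (pvA_answer_step t s q a b) (ps, pns, samples, tps, PySem.Dict.empty)).2.2.1
          = samples ++ (ans.filter (pvC a b)).map (pvPS t s q)
        ∧ (ans.foldl (pvA_answer_step t s q a b) (ps, pns, samples, tps, PySem.Dict.empty)).2.2.2.2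
          = PySem.Dict.empty) := by
  induction ans with
  | nil => intro ps pns samples tps _; simp
  | cons x rest ih =>
    intro ps pns samples tps h
    by_cases hc : pvC a b x = true
    · rw [List.foldl_cons, pvL2_step t s q a b x ps pns samples tps hc]
      obtain ⟨h1, h2, h3, h4⟩ :=
        ih (ps + 1) pns (samples ++ [pvPS t s q x]) (tps.insert s (pvPS t s q x))
          (by simp [PySem.Dict.get?_insert_self])
      refine ⟨?_, h2, ?_, h4⟩
      · rw [h1, List.filter_cons_of_pos hc]
        simp only [List.length_cons]; push_cast; ring
      · rw [h3, List.filter_cons_of_pos hc]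
        simp
    · have hc' : pvC a b x = false := by simpa using hc
      have hs : (tps.get? s).isNone = false := by
        cases ho : tps.get? s <;> simp [ho] at h ⊢
      rw [List.foldl_cons, pvL2_step_neg t s q a b x ps pns samples tps hs hc',
        List.filter_cons_of_neg (by simp [hc'])]
      exact ih ps pns samples tps h

-- A's answer loop after a provisional PNS has been recorded: nothing changes until a contained
-- answer cancels the PNS (pns_num returns to its start value) and the loop continues as in pvL2.
theorem pvL1_step_pos (t s q : String) (a b : Int) (x : Int × String)
    (ps pns1 : Int) (samples : List pvS)
    (hc : pvC a b x = true) :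
    pvA_answer_step t s q a b
        (ps, pns1, samples, PySem.Dict.empty, PySem.Dict.empty.insert s (t, s, q, (0:Int), (0:Int), ("PNS":String))) x
      = (ps + 1, pns1 - 1, samples ++ [pvPS t s q x], PySem.Dict.empty.insert s (pvPS t s q x), PySem.Dict.empty) := by
  simp only [pvC] at hc
  simp only [pvA_answer_step, hc, if_true, PySem.Dict.get?_insert_self, pv_erase_insert, pvPS]
  simp

theorem pvL1_step_neg (t s q : String) (a b : Int) (x : Int × String)
    (ps pns1 : Int) (samples : List pvS)
    (hc : pvC a b x = false) :
    pvA_answer_step t s q a b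
        (ps, pns1, samples, PySem.Dict.empty, PySem.Dict.empty.insert s (t, s, q, (0:Int), (0:Int), ("PNS":String))) x
      = (ps, pns1, samples, PySem.Dict.empty, PySem.Dict.empty.insert s (t, s, q, (0:Int), (0:Int), ("PNS":String))) := by
  simp only [pvC] at hc
  simp only [pvA_answer_step, hc, Bool.false_eq_true, if_false]
  split_ifs with h1 h2
  · rfl
  · exfalso; rw [PySem.Dict.get?_insert_self] at h2; simp at h2
  · rfl

theorem pvL1 (t s q : String) (a b : Int) (ans : List (Int × String)) (ps pns : Int) (samples : List pvS) :
    (if ans.filter (pvC a b) = [] then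
       ans.foldl (pvA_answer_step t s q a b)
           (ps, pns + 1, samples, PySem.Dict.empty, PySem.Dict.empty.insert s (t, s, q, (0:Int), (0:Int), ("PNS":String)))
         = (ps, pns + 1, samples, PySem.Dict.empty, PySem.Dict.empty.insert s (t, s, q, (0:Int), (0:Int), ("PNS":String)))
     else
       ((ans.foldl (pvA_answer_step t s q a b) (ps, pns + 1, samples, PySem.Dict.empty, PySem.Dict.empty.insert s (t, s, q, (0:Int), (0:Int), ("PNS":String)))).1
           = ps + ((ans.filter (pvC a b)).length : Int)
         ∧ (ans.foldl (pvA_answer_step t s q a b) (ps, pns + 1, samples, PySem.Dict.empty, PySem.Dict.empty.insert s (t, s, q, (0:Int), (0:Int), ("PNS":String)))).2.1 = pns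
         ∧ (ans.foldl (pvA_answer_step t s q a b) (ps, pns + 1, samples, PySem.Dict.empty, PySem.Dict.empty.insert s (t, s, q, (0:Int), (0:Int), ("PNS":String)))).2.2.1
           = samples ++ (ans.filter (pvC a b)).map (pvPS t s q)
         ∧ (ans.foldl (pvA_answer_step t s q a b) (ps, pns + 1, samples, PySem.Dict.empty, PySem.Dict.empty.insert s (t, s, q, (0:Int), (0:Int), ("PNS":String)))).2.2.2.2
           = PySem.Dict.empty)) := by
  induction ans with
  | nil => simp
  | cons x rest ih =>
    by_cases hc : pvC a b x = true
    · rw [if_neg (by rw [List.filter_cons_of_pos hc]; simp)]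
      rw [List.foldl_cons, pvL1_step_pos t s q a b x ps (pns + 1) samples hc]
      have he : pns + 1 - 1 = pns := by ring
      rw [he]
      obtain ⟨h1, h2, h3, h4⟩ :=
        pvL2 t s q a b rest (ps + 1) pns (samples ++ [pvPS t s q x])
          (PySem.Dict.empty.insert s (pvPS t s q x)) (by simp [PySem.Dict.get?_insert_self])
      refine ⟨?_, h2, ?_, h4⟩
      · rw [h1, List.filter_cons_of_pos hc]
        simp only [List.length_cons]; push_cast; ring
      · rw [h3, List.filter_cons_of_pos hc]
        simp
    · have hc' : pvC a b x = false := by simpa using hc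
      rw [List.foldl_cons, pvL1_step_neg t s q a b x ps (pns + 1) samples hc',
        List.filter_cons_of_neg (show ¬ pvC a b x = true by simp [hc'])]
      exact ih

theorem pvL0_step_skip (t s q : String) (a b : Int) (x : Int × String)
    (ps pns : Int) (samples : List pvS)
    (hc : pvC a b x = false) (hpn : pns > ps) :
    pvA_answer_step t s q a b (ps, pns, samples, PySem.Dict.empty, PySem.Dict.empty) x
      = (ps, pns, samples, PySem.Dict.empty, PySem.Dict.empty) := by
  simp only [pvC] at hc
  simp only [pvA_answer_step, hc, Bool.false_eq_true, if_false]
  rw [if_pos hpn]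

theorem pvL0_step_pns (t s q : String) (a b : Int) (x : Int × String)
    (ps pns : Int) (samples : List pvS)
    (hc : pvC a b x = false) (hpn : ¬ pns > ps) :
    pvA_answer_step t s q a b (ps, pns, samples, PySem.Dict.empty, PySem.Dict.empty) x
      = (ps, pns + 1, samples, PySem.Dict.empty, PySem.Dict.empty.insert s (t, s, q, (0:Int), (0:Int), ("PNS":String))) := by
  simp only [pvC] at hc
  simp only [pvA_answer_step, hc, Bool.false_eq_true, if_false]
  rw [if_neg hpn, if_pos (by simp [PySem.Dict.get?_empty])]

-- the whole answer loop of one possible qa_pair, from fresh temp dicts, finalized with temp_ns.values()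
theorem pvL0 (t s q : String) (a b : Int) (ans : List (Int × String)) (ps pns : Int) (samples : List pvS) :
    ((ans.foldl (pvA_answer_step t s q a b) (ps, pns, samples, PySem.Dict.empty, PySem.Dict.empty)).1,
      (ans.foldl (pvA_answer_step t s q a b) (ps, pns, samples, PySem.Dict.empty, PySem.Dict.empty)).2.1,
      (ans.foldl (pvA_answer_step t s q a b) (ps, pns, samples, PySem.Dict.empty, PySem.Dict.empty)).2.2.1
        ++ (ans.foldl (pvA_answer_step t s q a b) (ps, pns, samples, PySem.Dict.empty, PySem.Dict.empty)).2.2.2.2.values)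
    = (if ans.filter (pvC a b) ≠ [] then
         (ps + ((ans.filter (pvC a b)).length : Int), pns, samples ++ (ans.filter (pvC a b)).map (pvPS t s q))
       else if ans ≠ [] ∧ pns ≤ ps then
         (ps, pns + 1, samples ++ [(t, s, q, (0:Int), (0:Int), ("PNS":String))])
       else (ps, pns, samples)) := by
  induction ans with
  | nil => simp [PySem.Dict.values, PySem.Dict.empty]
  | cons x rest ih =>
    by_cases hc : pvC a b x = true
    · rw [List.foldl_cons, pvL2_step t s q a b x ps pns samples PySem.Dict.empty hc,
        if_pos (by rw [List.filter_cons_of_pos hc]; simp)]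
      obtain ⟨h1, h2, h3, h4⟩ :=
        pvL2 t s q a b rest (ps + 1) pns (samples ++ [pvPS t s q x])
          (PySem.Dict.empty.insert s (pvPS t s q x)) (by simp [PySem.Dict.get?_insert_self])
      rw [h1, h2, h3, h4, List.filter_cons_of_pos hc]
      refine Prod.ext ?_ (Prod.ext rfl ?_)
      · simp only [List.length_cons]; push_cast; ring
      · simp [PySem.Dict.values, PySem.Dict.empty]
    · have hc' : pvC a b x = false := by simpa using hc
      by_cases hpn : pns > ps
      · rw [List.foldl_cons, pvL0_step_skip t s q a b x ps pns samples hc' hpn, ih,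
          List.filter_cons_of_neg (by simp [hc'])]
        by_cases hf : rest.filter (pvC a b) = []
        · simp [hf, (show ¬ pns ≤ ps by omega)]
        · simp [hf]
      · rw [List.foldl_cons, pvL0_step_pns t s q a b x ps pns samples hc' hpn,
          List.filter_cons_of_neg (by simp [hc'])]
        have h1 := pvL1 t s q a b rest ps pns samples
        by_cases hf : rest.filter (pvC a b) = []
        · rw [if_pos hf] at h1
          rw [h1, if_neg (by simp [hf]), if_pos ⟨by simp, by omega⟩]
          simp [pv_values_insert]
        · rw [if_neg hf] at h1
          obtain ⟨h1, h2, h3, h4⟩ := h1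
          rw [h1, h2, h3, h4, if_pos (by simp [hf])]
          simp [PySem.Dict.values, PySem.Dict.empty]

theorem pv_qa_step_eq (t s : String) (a b : Int)
    (st : Int × Int × List (String × String × String × Int × Int × String))
    (qa : (List (Int × String)) × String × Bool × String) :
    pvA_qa_step t s a b st qa = pvB_qa_step t s a b st qa := by
  obtain ⟨ps, pns, samples⟩ := st
  obtain ⟨answers, qmeta, imp, q⟩ := qa
  cases imp
  · -- is_impossible = false
    have hfilter : (fun x : Int × String => seq_contain_answer a b x.1 (x.1 + PySem.Str.len x.2)) = pvC a b := rfl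
    have hmap : (fun x : Int × String => ((t, s, q, x.1, x.1 + PySem.Str.len x.2, "PS") : pvS)) = pvPS t s q := rfl
    simp only [pvA_qa_step, pvB_qa_step, Bool.false_eq_true, if_false, hfilter, hmap]
    exact pvL0 t s q a b answers ps pns samples
  · -- is_impossible = true
    simp only [pvA_qa_step, pvB_qa_step, if_true]
    rw [if_pos (by simp [PySem.Dict.get?_empty])]
    rw [pv_values_insert]

-- ===== VERDICT (by name: the statement is the Claim_ definition above) =====
theorem extract_samples_spec : Claim_equal_extract_samples := by
  intro contract _
  unfold Spec_extract_samples extract_samples extract_samples_alt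
  have h : ∀ (t s : String) (a b : Int), pvA_qa_step t s a b = pvB_qa_step t s a b :=
    fun t s a b => funext fun st => funext fun qa => pv_qa_step_eq t s a b st qa
  simp only [h]
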